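-- pv_equiv track=rewrite | github.com/elka4/JikeDS | J9Ch/src/S_7_Follow_Up/Optional_9/_404_Subarray_Sum_II_Hard.py | subarraySumII_TLE
-- ===== SOURCE A (Python) =====
-- def subarraySumII_TLE(A, start, end):
--     size = len(A)
--     sums = [0] * (size + 1)
--     for i in range(size):
--         sums[i] = sums[i - 1] + A[i]
--
--     result = 0
--     for i in range(size):
--         for j in range(i, size):
--             if start <= sums[j] - sums[i - 1] <= end:
--                 result += 1
--
--     return result
-- ===== SOURCE B (Python) =====
-- def _bisect(a, x, right):
--     # position where x would be inserted in sorted list a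
--     # (leftmost if right is False, rightmost if right is True)
--     lo, hi = 0, len(a)
--     while lo < hi:
--         mid = (lo + hi) // 2
--         if a[mid] < x or (right and a[mid] == x):
--             lo = mid + 1
--         else:
--             hi = mid
--     return lo
--
--
-- def subarraySumII_TLE(A, start, end):
--     if start > end:
--         return 0
--     seen = [0]          # sorted prefix sums seen so far
--     p = 0               # running prefix sum
--     result = 0
--     for x in A:
--         p += x
--         # previous prefix sums q with start <= p - q <= end,
--         # i.e. p - end <= q <= p - start
--         result += _bisect(seen, p - start, True) - _bisect(seen, p - end, False)
--         seen.insert(_bisect(seen, p, True), p)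
--     return result
-- ===== Notes on version B (the rewrite author's own statement) =====
-- stated objective: faster
-- what changed: Replaced the O(n^2) double loop over all (start,end) index pairs by a single left-to-right pass that keeps the prefix sums seen so far in a sorted list and counts, via hand-written binary search, how many earlier prefix sums fall in [p-end, p-start] for each new prefix sum p.
import Mathlib
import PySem

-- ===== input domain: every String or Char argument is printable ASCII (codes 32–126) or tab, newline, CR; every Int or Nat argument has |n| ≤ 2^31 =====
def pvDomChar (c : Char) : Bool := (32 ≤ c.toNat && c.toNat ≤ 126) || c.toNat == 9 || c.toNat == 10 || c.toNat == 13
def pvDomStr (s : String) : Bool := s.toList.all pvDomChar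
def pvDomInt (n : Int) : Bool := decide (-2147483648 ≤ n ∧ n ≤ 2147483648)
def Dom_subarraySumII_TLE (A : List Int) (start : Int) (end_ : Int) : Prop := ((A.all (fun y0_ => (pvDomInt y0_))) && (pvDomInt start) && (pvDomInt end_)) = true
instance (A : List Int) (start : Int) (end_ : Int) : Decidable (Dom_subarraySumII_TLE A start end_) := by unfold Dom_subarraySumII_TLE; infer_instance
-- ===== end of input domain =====

-- B replaces A's O(n^2) double loop over all index pairs by one left-to-right pass that keeps
-- the prefix sums seen so far in a sorted list and binary-searches the window [p-end, p-start].


-- ===== PORT A =====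
def subarraySumII_TLE (A : List Int) (start : Int) (end_ : Int) : Int :=
  let size : Int := (A.length : Int)
  -- sums = [0] * (size + 1); for i in range(size): sums[i] = sums[i - 1] + A[i]
  let sums : List Int := (PySem.List.pyRange 0 size 1).foldl
    (fun sums i =>
      PySem.List.pySetD sums i (PySem.List.pyGetD sums (i - 1) 0 + PySem.List.pyGetD A i 0))
    (List.replicate (A.length + 1) 0)
  -- result = 0; for i in range(size): for j in range(i, size): if start <= sums[j] - sums[i-1] <= end: result += 1
  (PySem.List.pyRange 0 size 1).foldl
    (fun result i =>
      (PySem.List.pyRange i size 1).foldl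
        (fun result j =>
          if start ≤ PySem.List.pyGetD sums j 0 - PySem.List.pyGetD sums (i - 1) 0 ∧
             PySem.List.pyGetD sums j 0 - PySem.List.pyGetD sums (i - 1) 0 ≤ end_
          then result + 1 else result)
        result)
    0

-- ===== PORT B =====
-- _bisect(a, x, right): the while-loop binary search of Source B; lo and hi stay in 0..len(a),
-- so Nat with Nat division matches Python's nonnegative-int arithmetic ((lo + hi) // 2) exactly.
def pvBisect (a : List Int) (x : Int) (right : Bool) (lo hi : Nat) : Nat :=
  if _h : lo < hi then
    let mid := (lo + hi) / 2
    if PySem.List.pyGetD a (mid : Int) 0 < x ∨ (right = true ∧ PySem.List.pyGetD a (mid : Int) 0 = x)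
    then pvBisect a x right (mid + 1) hi
    else pvBisect a x right lo mid
  else lo
termination_by hi - lo
decreasing_by all_goals omega

def subarraySumII_TLE_alt (A : List Int) (start : Int) (end_ : Int) : Int :=
  if start > end_ then 0
  else
    -- seen = [0]; p = 0; result = 0; for x in A: …
    (A.foldl
      (fun (st : Int × List Int × Int) x =>
        let p := st.1 + x
        let seen := st.2.1
        let result := st.2.2 +
          ((pvBisect seen (p - start) true 0 seen.length : Int) -
           (pvBisect seen (p - end_) false 0 seen.length : Int))
        (p, PySem.List.insert seen ((pvBisect seen p true 0 seen.length : Nat) : Int) p, result))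
      (0, [0], 0)).2.2

-- ===== PRECONDITION & SPEC =====
def Spec_subarraySumII_TLE (A : List Int) (start : Int) (end_ : Int) (out : Int) : Prop := out = subarraySumII_TLE_alt A start end_
instance (A : List Int) (start : Int) (end_ : Int) (out : Int) : Decidable (Spec_subarraySumII_TLE A start end_ out) := by unfold Spec_subarraySumII_TLE; infer_instance

-- ===== CLAIM (what is proved, stated in full; the proofs are below) =====
def Claim_equal_subarraySumII_TLE : Prop := ∀ (A : List Int) (start : Int) (end_ : Int), Dom_subarraySumII_TLE A start end_ → Spec_subarraySumII_TLE A start end_ (subarraySumII_TLE A start end_)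

-- ===== LEMMAS AND PROOFS =====

lemma pvBisect_loop_aux (a : List Int) (x : Int) (right : Bool)
    (hs : a.Pairwise (· ≤ ·)) :
    ∀ (n lo hi : Nat), hi - lo ≤ n → lo ≤ hi → hi ≤ a.length →
      (∀ j (hj : j < a.length), j < lo →
        (a[j] < x ∨ (right = true ∧ a[j] = x))) →
      (∀ j (hj : j < a.length), hi ≤ j →
        ¬ (a[j] < x ∨ (right = true ∧ a[j] = x))) →
      lo ≤ pvBisect a x right lo hi ∧ pvBisect a x right lo hi ≤ hi ∧
      (∀ j (hj : j < a.length),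
        ((a[j] < x ∨ (right = true ∧ a[j] = x)) ↔ j < pvBisect a x right lo hi)) := by
  have hmono : ∀ i j (hi' : i < a.length) (hj : j < a.length), i ≤ j →
      (a[j] < x ∨ (right = true ∧ a[j] = x)) → (a[i] < x ∨ (right = true ∧ a[i] = x)) := by
    intro i j hi' hj hij hP
    rcases Nat.eq_or_lt_of_le hij with rfl | hlt
    · exact hP
    · have hle : a[i] ≤ a[j] := (List.pairwise_iff_getElem.mp hs) i j hi' hj hlt
      rcases hP with h | ⟨hr, h⟩
      · exact Or.inl (lt_of_le_of_lt hle h)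
      · rcases lt_or_eq_of_le (h ▸ hle) with h' | h'
        · exact Or.inl h'
        · exact Or.inr ⟨hr, h'⟩
  intro n
  induction n with
  | zero =>
    intro lo hi hn hlh hha hlo hhi
    have : lo = hi := by omega
    subst this
    rw [pvBisect]
    simp only [lt_irrefl, dite_false]
    refine ⟨le_refl _, le_refl _, ?_⟩
    intro j hj
    constructor
    · intro hP
      by_contra hge
      exact hhi j hj (by omega) hP
    · intro hlt; exact hlo j hj hlt
  | succ n ih =>
    intro lo hi hn hlh hha hlo hhi
    rw [pvBisect]
    by_cases h : lo < hi
    · simp only [h, dite_true]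
      have hmidlt : (lo + hi) / 2 < hi := by omega
      have hmidge : lo ≤ (lo + hi) / 2 := by omega
      have hmlen : (lo + hi) / 2 < a.length := by omega
      have hget : PySem.List.pyGetD a (((lo + hi) / 2 : Nat) : Int) 0 = a[(lo + hi) / 2] := by
        rw [PySem.List.pyGetD_natCast]
        exact List.getD_eq_getElem a 0 hmlen
      by_cases hP : a[(lo + hi) / 2] < x ∨ (right = true ∧ a[(lo + hi) / 2] = x)
      · rw [if_pos (by rw [hget]; exact hP)]
        obtain ⟨h1, h2, h3⟩ := ih ((lo + hi) / 2 + 1) hi (by omega) (by omega) hha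
          (fun j hj hjlt => hmono j ((lo + hi) / 2) hj hmlen (by omega) hP)
          hhi
        exact ⟨by omega, h2, h3⟩
      · rw [if_neg (by rw [hget]; exact hP)]
        obtain ⟨h1, h2, h3⟩ := ih lo ((lo + hi) / 2) (by omega) (by omega) (by omega) hlo
          (fun j hj hjge hPj => hP (hmono ((lo + hi) / 2) j hmlen hj hjge hPj))
        exact ⟨h1, by omega, h3⟩
    · simp only [h, dite_false]
      have : lo = hi := by omega
      subst this
      refine ⟨le_refl _, le_refl _, ?_⟩
      intro j hj
      exact ⟨fun hP => by by_contra hge; exact hhi j hj (by omega) hP,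
             fun hlt => hlo j hj hlt⟩

lemma countP_threshold (a : List Int) (p : Int → Bool) :
    ∀ (r : Nat), r ≤ a.length →
      (∀ j (hj : j < a.length), (p a[j] = true ↔ j < r)) →
      a.countP p = r := by
  induction a with
  | nil => intro r hr _; simp at hr; simp [hr]
  | cons y t ih =>
    intro r hr h
    rcases r with _ | r'
    · rw [List.countP_eq_zero.mpr]
      intro v hv
      obtain ⟨j, hj, rfl⟩ := List.mem_iff_getElem.mp hv
      intro hp
      exact absurd ((h j hj).mp hp) (by omega)
    · have hy : p y = true := (h 0 (by simp)).mpr (by omega)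
      rw [List.countP_cons, if_pos hy, ih r' (by simpa using hr)
        (fun j hj => by simpa using (h (j+1) (by simpa using hj))) ]

lemma pvBisect_true_eq (a : List Int) (x : Int) (hs : a.Pairwise (· ≤ ·)) :
    pvBisect a x true 0 a.length = a.countP (fun v => decide (v ≤ x)) := by
  obtain ⟨h1, h2, h3⟩ := pvBisect_loop_aux a x true hs a.length 0 a.length (by omega) (by omega)
    (le_refl _) (by omega) (by intro j hj hge; omega)
  refine (countP_threshold a _ _ h2 ?_).symm
  intro j hj
  rw [← h3 j hj]
  simp only [decide_eq_true_eq, true_and]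
  omega

lemma pvBisect_false_eq (a : List Int) (x : Int) (hs : a.Pairwise (· ≤ ·)) :
    pvBisect a x false 0 a.length = a.countP (fun v => decide (v < x)) := by
  obtain ⟨h1, h2, h3⟩ := pvBisect_loop_aux a x false hs a.length 0 a.length (by omega) (by omega)
    (le_refl _) (by omega) (by intro j hj hge; omega)
  refine (countP_threshold a _ _ h2 ?_).symm
  intro j hj
  rw [← h3 j hj]
  simp

lemma countP_window (ms : List Int) (s e q : Int) (hse : s ≤ e) :
    ms.countP (fun v => decide (v ≤ q - s)) =
      ms.countP (fun v => decide (v < q - e)) +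
      ms.countP (fun v => decide (s ≤ q - v ∧ q - v ≤ e)) := by
  induction ms with
  | nil => simp
  | cons y t ih =>
    simp only [List.countP_cons, ih]
    split_ifs <;> simp only [decide_eq_true_eq, Decidable.not_and_iff_not_or_not, not_le, not_lt] at * <;> omega

lemma insert_sorted (a : List Int) (q : Int) (hs : a.Pairwise (· ≤ ·)) :
    (PySem.List.insert a ((pvBisect a q true 0 a.length : Nat) : Int) q).Pairwise (· ≤ ·) ∧
    (PySem.List.insert a ((pvBisect a q true 0 a.length : Nat) : Int) q).Perm (q :: a) := by
  obtain ⟨h1, h2, h3⟩ := pvBisect_loop_aux a q true hs a.length 0 a.length (by omega) (by omega)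
    (le_refl _) (by omega) (by intro j hj hge; omega)
  set idx := pvBisect a q true 0 a.length with hidx
  have hP : ∀ j (hj : j < a.length), (a[j] ≤ q ↔ j < idx) := by
    intro j hj
    rw [← h3 j hj]
    constructor
    · intro h; rcases lt_or_eq_of_le h with h | h
      · exact Or.inl h
      · exact Or.inr ⟨rfl, h⟩
    · intro h; rcases h with h | ⟨_, h⟩ <;> omega
  rw [PySem.List.insert_natCast a idx q h2]
  constructor
  · rw [List.pairwise_append]
    refine ⟨hs.sublist (List.take_sublist _ _), ?_, ?_⟩
    · rw [List.pairwise_cons]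
      refine ⟨?_, hs.sublist (List.drop_sublist _ _)⟩
      intro b hb
      obtain ⟨j, hj, rfl⟩ := List.mem_iff_getElem.mp hb
      rw [List.getElem_drop]
      have hjl : idx + j < a.length := by
        have := List.length_drop (l := a) (i := idx) ▸ hj; omega
      have := (hP (idx + j) hjl)
      omega
    · intro v hv b hb
      obtain ⟨j, hj, rfl⟩ := List.mem_iff_getElem.mp hv
      rw [List.getElem_take] at *
      have hjl : j < a.length := by
        have := List.length_take (i := idx) (l := a) ▸ hj; omega
      have hjidx : j < idx := by have := List.length_take (i := idx) (l := a) ▸ hj; omega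
      have hvq : a[j] ≤ q := (hP j hjl).mpr hjidx
      rcases List.mem_cons.mp hb with rfl | hb'
      · exact hvq
      · obtain ⟨k, hk, rfl⟩ := List.mem_iff_getElem.mp hb'
        rw [List.getElem_drop]
        have hkl : idx + k < a.length := by
          have := List.length_drop (l := a) (i := idx) ▸ hk; omega
        have : ¬ (a[idx + k] ≤ q) := by have := hP (idx + k) hkl; omega
        omega
  · calc (a.take idx ++ q :: a.drop idx).Perm (q :: (a.take idx ++ a.drop idx)) :=
          List.perm_middle
      _ = (q :: a) := by rw [List.take_append_drop]

def model (s e : Int) : List Int → Int → List Int → Nat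
  | [], _, _ => 0
  | x :: t, p, ms =>
    ms.countP (fun v => decide (s ≤ (p + x) - v ∧ (p + x) - v ≤ e)) + model s e t (p + x) ((p + x) :: ms)

def msAfter : List Int → Int → List Int → List Int
  | [], _, ms => ms
  | x :: t, p, ms => msAfter t (p + x) ((p + x) :: ms)

lemma B_loop_eq_model (s e : Int) (hse : s ≤ e) :
    ∀ (rest : List Int) (p res : Int) (seen ms : List Int),
      seen.Pairwise (· ≤ ·) → seen.Perm ms →
      (rest.foldl
        (fun (st : Int × List Int × Int) x =>
          let p := st.1 + x
          let seen := st.2.1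
          let result := st.2.2 +
            ((pvBisect seen (p - s) true 0 seen.length : Int) -
             (pvBisect seen (p - e) false 0 seen.length : Int))
          (p, PySem.List.insert seen ((pvBisect seen p true 0 seen.length : Nat) : Int) p, result))
        (p, seen, res)).2.2 = res + (model s e rest p ms : Int) := by
  intro rest
  induction rest with
  | nil => intro p res seen ms _ _; simp [model]
  | cons x t ih =>
    intro p res seen ms hsorted hperm
    rw [List.foldl_cons]
    have hcnt : (pvBisect seen ((p + x) - s) true 0 seen.length : Int) -
        (pvBisect seen ((p + x) - e) false 0 seen.length : Int) =
        (ms.countP (fun v => decide (s ≤ (p + x) - v ∧ (p + x) - v ≤ e)) : Int) := by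
      rw [pvBisect_true_eq seen ((p + x) - s) hsorted,
          pvBisect_false_eq seen ((p + x) - e) hsorted,
          hperm.countP_eq, hperm.countP_eq]
      have hw := countP_window ms s e (p + x) hse
      have h1 : ms.countP (fun v => decide (v ≤ (p + x) - s)) =
          ms.countP (fun v => decide (v ≤ p + x - s)) := by norm_num
      have h2 : ms.countP (fun v => decide (v < (p + x) - e)) =
          ms.countP (fun v => decide (v < p + x - e)) := by norm_num
      omega
    obtain ⟨hins_sorted, hins_perm⟩ := insert_sorted seen (p + x) hsorted
    rw [ih (p + x) _ _ ((p + x) :: ms) hins_sorted (hins_perm.trans (hperm.cons _))]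
    simp only [model]
    push_cast
    rw [hcnt]
    ring

lemma model_eq_zero_of_gt (s e : Int) (h : e < s) :
    ∀ (l : List Int) (p : Int) (ms : List Int), model s e l p ms = 0 := by
  intro l
  induction l with
  | nil => intro p ms; rfl
  | cons x t ih =>
    intro p ms
    simp only [model, ih, Nat.add_zero]
    rw [List.countP_eq_zero.mpr]
    intro v _
    simp only [decide_eq_true_eq]
    omega

lemma model_append (s e x : Int) :
    ∀ (l : List Int) (p : Int) (ms : List Int),
      model s e (l ++ [x]) p ms =
        model s e l p ms +
        (msAfter l p ms).countP
          (fun v => decide (s ≤ (p + l.sum + x) - v ∧ (p + l.sum + x) - v ≤ e)) := by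
  intro l
  induction l with
  | nil => intro p ms; simp [model, msAfter]
  | cons y t ih =>
    intro p ms
    simp only [List.cons_append, model, msAfter, ih, List.sum_cons]
    have h3 : p + (y + t.sum) = p + y + t.sum := (add_assoc p y t.sum).symm
    simp only [h3]
    omega

def psum (l : List Int) (k : Nat) : Int := (l.take k).sum

lemma psum_cons (y : Int) (t : List Int) (k : Nat) : psum (y :: t) (k + 1) = y + psum t k := by
  simp [psum, List.take_succ_cons]

lemma msAfter_perm :
    ∀ (l : List Int) (p : Int) (ms : List Int),
      (msAfter l p ms).Perm (((List.range l.length).map (fun k => p + psum l (k + 1))).reverse ++ ms) := by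
  intro l
  induction l with
  | nil => intro p ms; simp [msAfter]
  | cons y t ih =>
    intro p ms
    have step : msAfter (y :: t) p ms = msAfter t (p + y) ((p + y) :: ms) := rfl
    rw [step]
    have hr : ((List.range (y :: t).length).map (fun k => p + psum (y :: t) (k + 1))).reverse ++ ms
        = ((List.range t.length).map (fun k => (p + y) + psum t (k + 1))).reverse ++ ((p + y) :: ms) := by
      have : List.range (t.length + 1) = 0 :: (List.range t.length).map Nat.succ :=
        List.range_succ_eq_map
      simp only [List.length_cons, this, List.map_cons, List.map_map, List.reverse_cons,
        List.append_assoc, List.singleton_append]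
      congr 1
      · congr 1
        apply List.map_congr_left
        intro k _
        simp only [Function.comp_apply, Nat.succ_eq_add_one, psum_cons, add_assoc]
      · simp [psum]
    rw [hr]
    exact ih (p + y) ((p + y) :: ms)

lemma psum_succ (l : List Int) (k : Nat) (hk : k < l.length) :
    psum l (k + 1) = psum l k + l[k] := List.sum_take_succ l k hk

lemma sums_loop_aux (A : List Int) : ∀ (m : Nat), m ≤ A.length →
    ((PySem.List.pyRange 0 (m : Int) 1).foldl
      (fun sums i =>
        PySem.List.pySetD sums i (PySem.List.pyGetD sums (i - 1) 0 + PySem.List.pyGetD A i 0))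
      (List.replicate (A.length + 1) 0)) =
    (List.range (A.length + 1)).map (fun k => if k < m then psum A (k + 1) else 0) := by
  intro m
  induction m with
  | zero =>
    intro _
    rw [PySem.List.pyRange_one_eq_nil (by omega)]
    apply List.ext_getElem <;> simp
  | succ m ih =>
    intro hm1
    have hm : m < A.length := by omega
    have hcast : ((m + 1 : Nat) : Int) = (m : Int) + 1 := by push_cast; ring
    rw [hcast, PySem.List.pyRange_one_succ_right (by positivity), List.foldl_append,
      ih (by omega)]
    set g := fun (mm : Nat) (k : Nat) => if k < mm then psum A (k + 1) else (0 : Int) with hg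
    set L := (List.range (A.length + 1)).map (g m) with hL
    have hLlen : L.length = A.length + 1 := by simp [hL]
    have hget : PySem.List.pyGetD L ((m : Int) - 1) 0 = psum A m := by
      rcases Nat.eq_zero_or_pos m with rfl | hpos
      · have hne : L ≠ [] := by
          intro h; rw [h] at hLlen; simp at hLlen
        simp only [Nat.cast_zero, zero_sub]
        rw [PySem.List.pyGetD_neg_one L 0 hne]
        rw [List.getLast_eq_getElem]
        simp only [hL]
        rw [List.getElem_map]
        simp [hg, psum]
      · have : ((m : Int) - 1) = ((m - 1 : Nat) : Int) := by push_cast [hpos]; ring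
        rw [this, PySem.List.pyGetD_natCast, PySem.List.getD_map_range _ _ _ _ (by omega)]
        simp only [hg]
        rw [if_pos (by omega)]
        congr 1
        omega
    have hgetA : PySem.List.pyGetD A (m : Int) 0 = A[m] := by
      rw [PySem.List.pyGetD_natCast]
      exact List.getD_eq_getElem A 0 hm
    simp only [List.foldl_cons, List.foldl_nil]
    rw [hget, hgetA, PySem.List.pySetD_natCast]
    apply List.ext_getElem
    · simp [hL]
    · intro j hj1 hj2
      rw [List.getElem_set]
      simp only [hL, List.getElem_map, List.getElem_range]
      by_cases hjm : m = j
      · subst hjm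
        rw [if_pos rfl, if_pos (by omega), ← psum_succ A m hm]
      · rw [if_neg hjm]
        simp only [hg]
        by_cases hlt : j < m
        · rw [if_pos hlt, if_pos (by omega)]
        · rw [if_neg hlt, if_neg (by omega)]

lemma getD_sums_pred (A : List Int) (i : Nat) (hi : i ≤ A.length) :
    PySem.List.pyGetD
      ((List.range (A.length + 1)).map (fun k => if k < A.length then psum A (k + 1) else 0))
      ((i : Int) - 1) 0 = psum A i := by
  set L := (List.range (A.length + 1)).map (fun k => if k < A.length then psum A (k + 1) else (0 : Int)) with hL
  rcases Nat.eq_zero_or_pos i with rfl | hpos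
  · have hne : L ≠ [] := by simp [hL]
    simp only [Nat.cast_zero, zero_sub]
    rw [PySem.List.pyGetD_neg_one L 0 hne, List.getLast_eq_getElem]
    simp only [hL]
    rw [List.getElem_map]
    have hlen : L.length = A.length + 1 := by simp [hL]
    simp [psum]
  · have : ((i : Int) - 1) = ((i - 1 : Nat) : Int) := by push_cast [hpos]; ring
    rw [this, PySem.List.pyGetD_natCast, PySem.List.getD_map_range _ _ _ _ (by omega)]
    rw [if_pos (by omega)]
    congr 1
    omega

lemma getD_sums_at (A : List Int) (j : Nat) (hj : j < A.length) :
    PySem.List.pyGetD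
      ((List.range (A.length + 1)).map (fun k => if k < A.length then psum A (k + 1) else 0))
      ((j : Int)) 0 = psum A (j + 1) := by
  rw [PySem.List.pyGetD_natCast, PySem.List.getD_map_range _ _ _ _ (by omega), if_pos hj]

lemma A_eq_aCount (A : List Int) (s e : Int) :
    subarraySumII_TLE A s e =
      ((List.range A.length).map (fun i =>
        ((List.range (A.length - i)).countP (fun k =>
          decide (s ≤ psum A (i + k + 1) - psum A i ∧ psum A (i + k + 1) - psum A i ≤ e)) : Int))).sum := by
  simp only [subarraySumII_TLE]
  rw [sums_loop_aux A A.length (le_refl _)]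
  simp only [PySem.List.foldl_ite_add_one]
  rw [PySem.List.foldl_add]
  rw [PySem.List.pyRange_zero_nat, List.map_map]
  rw [zero_add]
  apply congrArg List.sum
  apply List.map_congr_left
  intro i hi
  have hiN : i < A.length := List.mem_range.mp hi
  simp only [Function.comp_apply]
  congr 1
  have hrange : PySem.List.pyRange (i : Int) (A.length : Int) 1 =
      (List.range (A.length - i)).map (fun k : Nat => (i : Int) + (k : Int)) := by
    rw [PySem.List.pyRange_one]
    have htn : (((A.length : Int)) - (i : Int)).toNat = A.length - i := by omega
    rw [htn]
  rw [hrange, List.countP_map]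
  apply List.countP_congr
  intro k hk
  have hkNi : k < A.length - i := List.mem_range.mp hk
  simp only [Function.comp_apply]
  have hcast : (i : Int) + (k : Int) = ((i + k : Nat) : Int) := by push_cast; ring
  rw [hcast, getD_sums_at A (i + k) (by omega), getD_sums_pred A i (by omega)]

lemma psum_append (l : List Int) (x : Int) (k : Nat) (hk : k ≤ l.length) :
    psum (l ++ [x]) k = psum l k := by
  simp [psum, List.take_append_of_le_length hk]

lemma psum_append_full (l : List Int) (x : Int) :
    psum (l ++ [x]) (l.length + 1) = l.sum + x := by
  unfold psum
  rw [List.take_of_length_le (by simp), List.sum_append]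
  simp

lemma aCount_eq_model (s e : Int) :
    ∀ (l : List Int),
      ((List.range l.length).map (fun i =>
        ((List.range (l.length - i)).countP (fun k =>
          decide (s ≤ psum l (i + k + 1) - psum l i ∧ psum l (i + k + 1) - psum l i ≤ e)) : Int))).sum
      = (model s e l 0 [0] : Int) := by
  intro l
  induction l using List.reverseRecOn with
  | nil => simp [model]
  | append_singleton l x ih =>
    set N := l.length with hN
    set Q := l.sum + x with hQdef
    set bcond : Nat → Bool := fun i => decide (s ≤ Q - psum l i ∧ Q - psum l i ≤ e) with hbcond
    have hlen : (l ++ [x]).length = N + 1 := by simp [hN]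
    have hQ : psum (l ++ [x]) (N + 1) = Q := psum_append_full l x
    have hL1 :
        ((List.range (l ++ [x]).length).map (fun i =>
          ((List.range ((l ++ [x]).length - i)).countP (fun k =>
            decide (s ≤ psum (l ++ [x]) (i + k + 1) - psum (l ++ [x]) i ∧
                    psum (l ++ [x]) (i + k + 1) - psum (l ++ [x]) i ≤ e)) : Int))).sum
        = ((List.range N).map (fun i =>
            ((List.range (N - i)).countP (fun k =>
              decide (s ≤ psum l (i + k + 1) - psum l i ∧ psum l (i + k + 1) - psum l i ≤ e)) : Int))).sum
          + ((List.range (N + 1)).map (fun i => if bcond i = true then (1 : Int) else 0)).sum := by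
      rw [hlen]
      rw [List.range_succ, List.map_append, List.sum_append]
      have hsing :
          ((List.map (fun i =>
            ((List.range (N + 1 - i)).countP (fun k =>
              decide (s ≤ psum (l ++ [x]) (i + k + 1) - psum (l ++ [x]) i ∧
                      psum (l ++ [x]) (i + k + 1) - psum (l ++ [x]) i ≤ e)) : Int)) [N]).sum)
          = (List.map (fun i => if bcond i = true then (1 : Int) else 0) [N]).sum := by
        simp only [List.map_cons, List.map_nil, List.sum_cons, List.sum_nil]
        have h1 : N + 1 - N = 1 := by omega
        rw [h1]
        have h2 : List.range 1 = [0] := rfl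
        rw [h2]
        simp only [List.countP_cons, List.countP_nil]
        have h3 : N + 0 + 1 = N + 1 := by omega
        rw [h3, hQ, psum_append l x N (le_refl _)]
        simp [hbcond]
      rw [hsing]
      have hmap : ∀ i ∈ List.range N,
          ((List.range (N + 1 - i)).countP (fun k =>
            decide (s ≤ psum (l ++ [x]) (i + k + 1) - psum (l ++ [x]) i ∧
                    psum (l ++ [x]) (i + k + 1) - psum (l ++ [x]) i ≤ e)) : Int)
          = ((List.range (N - i)).countP (fun k =>
              decide (s ≤ psum l (i + k + 1) - psum l i ∧ psum l (i + k + 1) - psum l i ≤ e)) : Int)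
            + (if bcond i = true then (1 : Int) else 0) := by
        intro i hi
        have hiN : i < N := List.mem_range.mp hi
        have h4 : N + 1 - i = (N - i) + 1 := by omega
        rw [h4, List.range_succ, List.countP_append]
        have hold : (List.range (N - i)).countP (fun k =>
              decide (s ≤ psum (l ++ [x]) (i + k + 1) - psum (l ++ [x]) i ∧
                      psum (l ++ [x]) (i + k + 1) - psum (l ++ [x]) i ≤ e))
            = (List.range (N - i)).countP (fun k =>
              decide (s ≤ psum l (i + k + 1) - psum l i ∧ psum l (i + k + 1) - psum l i ≤ e)) := by
          apply List.countP_congr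
          intro k hk
          have hkN : k < N - i := List.mem_range.mp hk
          rw [psum_append l x (i + k + 1) (by omega), psum_append l x i (by omega)]
        rw [hold]
        have hnew : ([N - i] : List Nat).countP (fun k =>
              decide (s ≤ psum (l ++ [x]) (i + k + 1) - psum (l ++ [x]) i ∧
                      psum (l ++ [x]) (i + k + 1) - psum (l ++ [x]) i ≤ e))
            = (if bcond i = true then 1 else 0) := by
          simp only [List.countP_cons, List.countP_nil]
          have h5 : i + (N - i) + 1 = N + 1 := by omega
          rw [h5, hQ, psum_append l x i (by omega)]
          simp [hbcond]
        rw [hnew]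
        split_ifs <;> push_cast <;> ring
      rw [List.map_congr_left hmap, PySem.List.sum_map_add_int, List.map_append, List.sum_append]
      ring
    rw [hL1, ih]
    have hR1 : (model s e (l ++ [x]) 0 [0] : Int)
        = (model s e l 0 [0] : Int)
          + ((List.range (N + 1)).map (fun i => if bcond i = true then (1 : Int) else 0)).sum := by
      rw [model_append s e x l 0 [0]]
      have hwin : (msAfter l 0 [0]).countP
            (fun v => decide (s ≤ 0 + l.sum + x - v ∧ 0 + l.sum + x - v ≤ e))
          = (List.range (N + 1)).countP (fun i => bcond i) := by
        rw [(msAfter_perm l 0 [0]).countP_eq, List.countP_append, List.countP_reverse,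
          List.countP_map]
        have hrhs : (List.range (N + 1)).countP (fun i => bcond i)
            = (List.range N).countP ((fun i => bcond i) ∘ Nat.succ)
              + (if bcond 0 = true then 1 else 0) := by
          rw [show List.range (N + 1) = 0 :: (List.range N).map Nat.succ from List.range_succ_eq_map]
          rw [List.countP_cons, List.countP_map]
        rw [hrhs]
        have hcomp : (List.range N).countP ((fun v => decide (s ≤ 0 + l.sum + x - v ∧ 0 + l.sum + x - v ≤ e)) ∘ fun k => 0 + psum l (k + 1))
            = (List.range N).countP ((fun i => bcond i) ∘ Nat.succ) := by
          apply List.countP_congr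
          intro k _
          simp only [Function.comp_apply, hbcond, Nat.succ_eq_add_one, hQdef, decide_eq_true_eq]
          constructor <;> (intro h; omega)
        have hzero : ([0] : List Int).countP (fun v => decide (s ≤ 0 + l.sum + x - v ∧ 0 + l.sum + x - v ≤ e))
            = (if bcond 0 = true then 1 else 0) := by
          rw [List.countP_cons, List.countP_nil]
          have hb : bcond 0 = decide (s ≤ 0 + l.sum + x - 0 ∧ 0 + l.sum + x - 0 ≤ e) := by
            simp only [hbcond, hQdef, psum, List.take_zero, List.sum_nil]
            rw [decide_eq_decide]
            constructor <;> (intro h; omega)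
          rw [hb]
          omega
        rw [hcomp, hzero]
      rw [hwin]
      have hsum : ((List.range (N + 1)).map (fun i => if bcond i = true then (1 : Int) else 0)).sum
          = ((List.range (N + 1)).countP (fun i => bcond i) : Int) := by
        rw [PySem.List.sum_map_ite_one_zero]
      rw [hsum]
      push_cast
      ring
    rw [hR1]


-- ===== VERDICT (by name: the statement is the Claim_ definition above) =====
theorem subarraySumII_TLE_spec : Claim_equal_subarraySumII_TLE := by
  intro A s e _
  unfold Spec_subarraySumII_TLE subarraySumII_TLE_alt
  rw [A_eq_aCount, aCount_eq_model]
  by_cases hse : s > e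
  · simp [hse, model_eq_zero_of_gt s e hse]
  · simp only [if_neg hse]
    rw [B_loop_eq_model s e (by omega) A 0 0 [0] [0] (by simp) (List.Perm.refl _)]
    simp
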